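-- pv_equiv track=rewrite | github.com/PhanSayam/M1_Info | Crypto/CC1/CC1.py | sous_groupe_gen_add
-- ===== SOURCE A (Python) =====
-- def sous_groupe_gen_add(a, n):
--     elems = []
--     temp = a % n
--     while temp != 0:
--         elems.append(temp)
--         temp = (temp + a) % n
--     elems.append(0)
--     return elems
-- ===== SOURCE B (Python) =====
-- def sous_groupe_gen_add(a, n):
--     x = a % n  # raises ZeroDivisionError for n == 0, exactly like A
--     g, h = abs(x), abs(n)
--     while h:
--         g, h = h, g % h
--     m = abs(n) // g
--     return [(i * a) % n for i in range(1, m + 1)]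
-- ===== Notes on version B (the rewrite author's own statement) =====
-- stated objective: alternative
-- what changed: B computes the subgroup order m = |n| // gcd(a % n, n) in closed form (Euclid) and produces each element by direct multiplication (i*a) % n over a counted range, replacing A's sentinel-terminated while-loop that accumulates temp += a until it hits 0.
import Mathlib
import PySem

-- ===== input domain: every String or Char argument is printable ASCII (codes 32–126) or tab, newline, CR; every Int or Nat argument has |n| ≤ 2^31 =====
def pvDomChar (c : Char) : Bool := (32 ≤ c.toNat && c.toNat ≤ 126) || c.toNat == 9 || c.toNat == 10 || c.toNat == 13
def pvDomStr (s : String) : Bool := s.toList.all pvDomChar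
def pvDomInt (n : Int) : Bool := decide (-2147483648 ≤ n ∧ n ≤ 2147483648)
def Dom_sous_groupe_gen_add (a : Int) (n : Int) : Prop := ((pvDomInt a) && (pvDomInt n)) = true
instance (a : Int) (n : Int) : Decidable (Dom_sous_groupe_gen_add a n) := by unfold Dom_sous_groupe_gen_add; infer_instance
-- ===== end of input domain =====

-- B replaces A's sentinel-terminated accumulation loop by the closed-form subgroup
-- order m = |n| / gcd(a % n, n) and a counted comprehension; same asymptotic cost.

-- ===== PORT A =====
-- A's while-loop: fuel n.natAbs is an upper bound on the number of iterations
-- (the loop runs |n|/gcd(a,n) ≤ |n| times when n ≠ 0); it only makes the loop total.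
def loopA (a n : Int) : Nat → Int → List Int
  | 0, _ => [0]
  | f + 1, t => if t = 0 then [0] else t :: loopA a n f (PySem.Int.mod (t + a) n)

def sous_groupe_gen_add (a : Int) (n : Int) : List Int :=
  loopA a n n.natAbs (PySem.Int.mod a n)

-- ===== PORT B =====
-- Source B's hand-written Euclid loop: while h: g, h = h, g % h
def gcdLoop (g : Nat) (h : Nat) : Nat :=
  match h with
  | 0 => g
  | h' + 1 => gcdLoop (h' + 1) (g % (h' + 1))
termination_by h
decreasing_by exact Nat.mod_lt _ (Nat.succ_pos _)

def sous_groupe_gen_add_alt (a : Int) (n : Int) : List Int :=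
  (PySem.List.pyRange 1
      (((n.natAbs / gcdLoop (PySem.Int.mod a n).natAbs n.natAbs : Nat) : Int) + 1) 1).map
    (fun i => PySem.Int.mod (i * a) n)

-- ===== PRECONDITION & SPEC =====
-- Pre_ excludes exactly n = 0, where Python's 'a % n' raises ZeroDivisionError (in both A and B).
def Pre_sous_groupe_gen_add (_a : Int) (n : Int) : Prop := n ≠ 0
instance (a : Int) (n : Int) : Decidable (Pre_sous_groupe_gen_add a n) := by
  unfold Pre_sous_groupe_gen_add; infer_instance
def pvWitness_sous_groupe_gen_add : Int × Int := (2, 6)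

def Spec_sous_groupe_gen_add (a : Int) (n : Int) (out : List Int) : Prop := out = sous_groupe_gen_add_alt a n
instance (a : Int) (n : Int) (out : List Int) : Decidable (Spec_sous_groupe_gen_add a n out) := by unfold Spec_sous_groupe_gen_add; infer_instance

-- ===== CLAIM (what is proved, stated in full; the proofs are below) =====
def Claim_equal_sous_groupe_gen_add : Prop := ∀ (a : Int) (n : Int), Dom_sous_groupe_gen_add a n → Pre_sous_groupe_gen_add a n → Spec_sous_groupe_gen_add a n (sous_groupe_gen_add a n)

-- ===== LEMMAS AND PROOFS =====

-- the hand-written Euclid loop is Nat.gcd with swapped arguments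
theorem gcdLoop_eq (h g : Nat) : gcdLoop g h = Nat.gcd h g := by
  induction h using Nat.strong_induction_on generalizing g with
  | _ h IH =>
    match h with
    | 0 => simp [gcdLoop]
    | h' + 1 =>
      rw [gcdLoop, IH (g % (h' + 1)) (Nat.mod_lt _ (Nat.succ_pos _)), Nat.gcd_succ]

-- Python mod (= Int.fmod) absorbs an inner fmod on the left of an addition
theorem fmod_add_left (x y n : Int) :
    Int.fmod (Int.fmod x n + y) n = Int.fmod (x + y) n := by
  conv_rhs => rw [← Int.fmod_add_mul_fdiv x n]
  have : Int.fmod x n + n * x.fdiv n + y = Int.fmod x n + y + (x.fdiv n) * n := by ring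
  rw [this, Int.add_mul_fmod_self_right]

-- gcd is invariant under taking a mod n
theorem gcd_fmod (a n : Int) : Int.gcd (Int.fmod a n) n = Int.gcd a n := by
  have hx : Int.fmod a n = a + (-(a.fdiv n)) * n := by
    have := Int.fmod_add_mul_fdiv a n; linarith
  rw [hx, Int.gcd_add_mul_right_left]

-- the order of a in Z_n: n ∣ i*a ↔ (|n|/gcd) ∣ i
theorem dvd_mul_iff (a n : Int) (hn : n ≠ 0) (i : Nat) :
    n ∣ (i : Int) * a ↔ (n.natAbs / Int.gcd a n) ∣ i := by
  set A := a.natAbs with hA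
  set N := n.natAbs with hN
  have hN0 : 0 < N := Int.natAbs_pos.mpr hn
  set g := Nat.gcd A N with hg
  have hgA : g ∣ A := Nat.gcd_dvd_left _ _
  have hgN : g ∣ N := Nat.gcd_dvd_right _ _
  have hg0 : 0 < g := Nat.gcd_pos_of_pos_right _ hN0
  have hgcd : Int.gcd a n = g := rfl
  rw [hgcd]
  have hnat : n ∣ (i : Int) * a ↔ N ∣ i * A := by
    rw [← Int.natAbs_dvd_natAbs, Int.natAbs_mul, Int.natAbs_natCast]
  rw [hnat]
  set m := N / g with hm
  have hNm : N = g * m := by rw [hm, Nat.mul_div_cancel' hgN]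
  constructor
  · intro hdvd
    have h1 : g * m ∣ g * (i * (A / g)) := by
      rw [← hNm]
      have : g * (i * (A / g)) = i * A := by
        rw [mul_comm g, mul_assoc, Nat.div_mul_cancel hgA]
      rw [this]; exact hdvd
    have h2 : m ∣ i * (A / g) := (Nat.mul_dvd_mul_iff_left hg0).mp h1
    have hcop : Nat.Coprime (A / g) (N / g) := Nat.coprime_div_gcd_div_gcd hg0
    exact (Nat.Coprime.dvd_of_dvd_mul_right (Nat.Coprime.symm hcop) h2)
  · intro hdvd
    obtain ⟨k, hk⟩ := hdvd
    have : i * A = N * (k * (A / g)) := by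
      rw [hk, hNm]
      have : g * (A / g) = A := Nat.mul_div_cancel' hgA
      calc m * k * A = m * k * (g * (A / g)) := by rw [this]
        _ = g * m * (k * (A / g)) := by ring
    exact ⟨_, this⟩

-- ===== VERDICT helper: the loop computes the comprehension =====
theorem loop_eq (a n : Int) (hn : n ≠ 0) :
    ∀ (f i : Nat), 1 ≤ i → i ≤ n.natAbs / Int.gcd a n → n.natAbs / Int.gcd a n - i < f →
      loopA a n f (Int.fmod ((i : Int) * a) n) =
        (List.range' i (n.natAbs / Int.gcd a n - i + 1)).map (fun (j : Nat) => Int.fmod ((j : Int) * a) n) := by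
  intro f
  set m := n.natAbs / Int.gcd a n with hm
  induction f with
  | zero => intro i _ _ h; omega
  | succ f IH =>
    intro i h1 h2 hf
    by_cases hi : i = m
    · have hz : Int.fmod ((i : Int) * a) n = 0 := by
        apply Int.fmod_eq_zero_of_dvd
        exact (dvd_mul_iff a n hn i).mpr (by rw [hi])
      rw [loopA]
      simp only [PySem.Int.mod, hz]
      rw [show m - i + 1 = 1 by omega]
      simp [List.range', hz]
    · have hilt : i < m := lt_of_le_of_ne h2 hi
      have hnz : Int.fmod ((i : Int) * a) n ≠ 0 := by
        intro hz
        have hd := (dvd_mul_iff a n hn i).mp (Int.dvd_of_fmod_eq_zero hz)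
        have := Nat.le_of_dvd (by omega) hd
        omega
      rw [loopA]
      simp only [PySem.Int.mod, if_neg hnz]
      have hstep : Int.fmod (Int.fmod ((i : Int) * a) n + a) n
          = Int.fmod (((i + 1 : Nat) : Int) * a) n := by
        rw [fmod_add_left]
        congr 1
        push_cast; ring
      rw [hstep, IH (i + 1) (by omega) (by omega) (by omega)]
      rw [show m - i + 1 = (m - (i + 1) + 1) + 1 by omega]
      conv_rhs => rw [List.range'_succ]
      simp

theorem sous_groupe_gen_add_spec : Claim_equal_sous_groupe_gen_add := by
  unfold Claim_equal_sous_groupe_gen_add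
  intro a n _ hn
  unfold Spec_sous_groupe_gen_add sous_groupe_gen_add sous_groupe_gen_add_alt
  have hn' : n ≠ 0 := hn
  have hN0 : 0 < n.natAbs := Int.natAbs_pos.mpr hn'
  -- identify B's gcd with Int.gcd a n
  have hg : gcdLoop (PySem.Int.mod a n).natAbs n.natAbs = Int.gcd a n := by
    rw [gcdLoop_eq, Nat.gcd_comm]
    exact gcd_fmod a n
  rw [hg]
  have hg0 : 0 < Int.gcd a n := Nat.gcd_pos_of_pos_right _ hN0
  have hgN : Int.gcd a n ∣ n.natAbs := Nat.gcd_dvd_right _ _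
  have hm1 : 1 ≤ n.natAbs / Int.gcd a n := Nat.div_pos (Nat.le_of_dvd hN0 hgN) hg0
  have hmN : n.natAbs / Int.gcd a n ≤ n.natAbs := Nat.div_le_self _ _
  have hstart : PySem.Int.mod a n = Int.fmod (((1 : Nat) : Int) * a) n := by
    simp [PySem.Int.mod]
  rw [hstart, loop_eq a n hn' n.natAbs 1 le_rfl hm1 (by omega)]
  rw [PySem.List.pyRange_one]
  rw [show (((n.natAbs / Int.gcd a n : Nat) : Int) + 1 - 1).toNat = n.natAbs / Int.gcd a n by omega]
  rw [show n.natAbs / Int.gcd a n - 1 + 1 = n.natAbs / Int.gcd a n by omega]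
  rw [List.range'_eq_map_range]
  simp only [List.map_map]
  apply List.map_congr_left
  intro k _
  simp only [Function.comp, PySem.Int.mod]
  congr 1
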